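-- pv_equiv track=rewrite | github.com/plusplusoneplusplus/mcp | utils/vector_store/markdown_segmenter.py | _get_nearest_heading
-- ===== SOURCE A (Python) =====
-- from typing import List, Dict, Any, Optional, Tuple, Union
--
-- def _get_nearest_heading(
--     headings: List[Tuple[int, str, int]], position: int
-- ) -> str:
--     """
--     Get the nearest heading before a given position.
--
--     Args:
--         headings: List of heading tuples (position, text, level)
--         position: Position to find heading for
--
--     Returns:
--         Heading text or empty string if no heading found
--     """
--     nearest_heading = ""
--     nearest_position = -1
--     nearest_level = 100  # Start with a high level
--
--     for head_pos, head_text, head_level in headings: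
--         if head_pos <= position and head_pos > nearest_position:
--             # If we have multiple headings at the same position, prefer the one with lower level (## over ###)
--             if head_pos > nearest_position or head_level < nearest_level:
--                 nearest_heading = head_text
--                 nearest_position = head_pos
--                 nearest_level = head_level
--
--     return nearest_heading
-- ===== SOURCE B (Python) =====
-- def _get_nearest_heading(headings, position):
--     # Sort headings by position, descending (stable), then return the first
--     # one at or before `position`; "" if none exists.
--     for head_pos, head_text, _head_level in sorted(headings, key=lambda h: h[0], reverse=True):
--         if head_pos <= position:
--             return head_text
--     return ""
-- ===== Notes on version B (the rewrite author's own statement) =====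
-- stated objective: alternative
-- what changed: Replaces A's single-pass sentinel accumulator (nearest_heading/nearest_position/nearest_level with a dead level tie-break branch) by sort-then-scan: stable-sort the headings by position in descending order and return the text of the first one with head_pos <= position (stability reproduces A's first-heading-wins tie behaviour), "" if none.
-- intended difference: On inputs where some heading satisfies head_pos <= position but every such candidate has a negative head_pos, A returns "" because its -1 sentinel silently discards negative-position candidates, while B returns the text of the nearest (maximal-position) candidate, which is the intended 'nearest heading before the position'. — e.g. on _get_nearest_heading([(-2, "intro", 1)], 0): A returns "", B returns "intro"
import Mathlib
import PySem

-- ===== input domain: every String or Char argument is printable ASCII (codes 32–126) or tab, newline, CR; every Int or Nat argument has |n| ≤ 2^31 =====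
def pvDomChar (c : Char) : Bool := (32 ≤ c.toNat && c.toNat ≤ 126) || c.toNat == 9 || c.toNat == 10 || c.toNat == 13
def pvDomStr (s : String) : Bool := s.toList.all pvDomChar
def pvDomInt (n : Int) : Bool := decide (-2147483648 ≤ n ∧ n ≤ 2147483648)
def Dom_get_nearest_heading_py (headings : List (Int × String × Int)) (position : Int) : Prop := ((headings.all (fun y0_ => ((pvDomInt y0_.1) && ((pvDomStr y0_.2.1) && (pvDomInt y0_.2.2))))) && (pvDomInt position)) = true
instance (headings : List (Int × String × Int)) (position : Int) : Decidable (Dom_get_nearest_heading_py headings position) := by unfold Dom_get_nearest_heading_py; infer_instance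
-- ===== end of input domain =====

-- B replaces A's single-pass sentinel accumulator by stable sort (descending by position)
-- followed by a first-hit scan; return values only, no mutation.

-- ===== PORT A =====
-- loop state: (nearest_heading, nearest_position, nearest_level), initial ("", -1, 100)
def get_nearest_heading_py (headings : List (Int × String × Int)) (position : Int) : String :=
  (headings.foldl
    (fun s h =>
      if h.1 ≤ position ∧ s.2.1 < h.1 then
        if s.2.1 < h.1 ∨ h.2.2 < s.2.2 then (h.2.1, h.1, h.2.2) else s
      else s)
    ("", -1, 100)).1

-- ===== PORT B =====
-- the `for … return` loop of Source B: first element of the sorted list with head_pos ≤ position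
def pvScanB (position : Int) : List (Int × String × Int) → String
  | [] => ""
  | h :: t => if h.1 ≤ position then h.2.1 else pvScanB position t

-- sorted(headings, key=lambda h: h[0], reverse=True), then scan for the first candidate
def get_nearest_heading_py_alt (headings : List (Int × String × Int)) (position : Int) : String :=
  pvScanB position (PySem.List.sorted headings (fun h => h.1) true)

-- ===== PRECONDITION & SPEC =====
-- On inputs where some heading has head_pos ≤ position but every such candidate has a negative
-- head_pos, A returns "" (its -1 sentinel silently discards negative-position candidates) while
-- B returns the text of the maximal-position candidate, the intended nearest heading.
def D_get_nearest_heading_py (headings : List (Int × String × Int)) (position : Int) : Prop :=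
  (∃ h ∈ headings, h.1 ≤ position) ∧ (∀ h ∈ headings, h.1 ≤ position → h.1 < 0)
instance (headings : List (Int × String × Int)) (position : Int) : Decidable (D_get_nearest_heading_py headings position) := by unfold D_get_nearest_heading_py; infer_instance

def Spec_get_nearest_heading_py (headings : List (Int × String × Int)) (position : Int) (out : String) : Prop := ¬ D_get_nearest_heading_py headings position → out = get_nearest_heading_py_alt headings position
instance (headings : List (Int × String × Int)) (position : Int) (out : String) : Decidable (Spec_get_nearest_heading_py headings position out) := by unfold Spec_get_nearest_heading_py; infer_instance

def pvDiffWitness_get_nearest_heading_py : (List (Int × String × Int)) × Int := ([(-2, "intro", 1)], 0)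
def pvDiffWitnessOut_get_nearest_heading_py : String × String := ("", "intro")

-- ===== CLAIM (what is proved, stated in full; the proofs are below) =====
def Claim_unchanged_get_nearest_heading_py : Prop := ∀ (headings : List (Int × String × Int)) (position : Int), Dom_get_nearest_heading_py headings position → Spec_get_nearest_heading_py headings position (get_nearest_heading_py headings position)
def Claim_changed_get_nearest_heading_py : Prop := Dom_get_nearest_heading_py (pvDiffWitness_get_nearest_heading_py.1) (pvDiffWitness_get_nearest_heading_py.2) ∧ D_get_nearest_heading_py (pvDiffWitness_get_nearest_heading_py.1) (pvDiffWitness_get_nearest_heading_py.2) ∧ get_nearest_heading_py (pvDiffWitness_get_nearest_heading_py.1) (pvDiffWitness_get_nearest_heading_py.2) = pvDiffWitnessOut_get_nearest_heading_py.1 ∧ get_nearest_heading_py_alt (pvDiffWitness_get_nearest_heading_py.1) (pvDiffWitness_get_nearest_heading_py.2) = pvDiffWitnessOut_get_nearest_heading_py.2 ∧ pvDiffWitnessOut_get_nearest_heading_py.1 ≠ pvDiffWitnessOut_get_nearest_heading_py.2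

-- ===== LEMMAS AND PROOFS =====

-- A's step with the dead level branch removed (the inner disjunction is implied by the outer test)
def pvGStep (position : Int) (s : String × Int) (h : Int × String × Int) : String × Int :=
  if h.1 ≤ position ∧ s.2 < h.1 then (h.2.1, h.1) else s

-- running "first maximal candidate" accumulator (the semantic bridge between the two loops)
def pvCStep (position : Int) (acc : Option (Int × String × Int)) (h : Int × String × Int) :
    Option (Int × String × Int) :=
  if h.1 ≤ position then
    match acc with
    | none => some h
    | some m => if m.1 < h.1 then some h else some m
  else acc

-- first element of l with position ≤ `position` (Option form of pvScanB)
def pvScanF (position : Int) : List (Int × String × Int) → Option (Int × String × Int)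
  | [] => none
  | h :: t => if h.1 ≤ position then some h else pvScanF position t

lemma pvA_drop_level (position : Int) :
    ∀ (l : List (Int × String × Int)) (t : String) (p lv : Int),
      (l.foldl
        (fun s h =>
          if h.1 ≤ position ∧ s.2.1 < h.1 then
            if s.2.1 < h.1 ∨ h.2.2 < s.2.2 then (h.2.1, h.1, h.2.2) else s
          else s)
        (t, p, lv)).1
      = (l.foldl (pvGStep position) (t, p)).1 := by
  intro l
  induction l with
  | nil => intro t p lv; rfl
  | cons h tl ih =>
    intro t p lv
    simp only [List.foldl_cons, pvGStep]
    by_cases hc : h.1 ≤ position ∧ p < h.1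
    · simp [hc, ih]
    · simp [hc, ih]

lemma pvScanB_eq_scanF (position : Int) :
    ∀ l : List (Int × String × Int),
      pvScanB position l = (match pvScanF position l with | none => "" | some m => m.2.1) := by
  intro l
  induction l with
  | nil => rfl
  | cons h t ih =>
    by_cases hc : h.1 ≤ position <;> simp [pvScanB, pvScanF, hc, ih]

lemma pvScanF_some (position : Int) :
    ∀ {l : List (Int × String × Int)} {m}, pvScanF position l = some m → m ∈ l ∧ m.1 ≤ position := by
  intro l
  induction l with
  | nil => intro m h; simp [pvScanF] at h
  | cons h t ih =>
    intro m hm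
    by_cases hc : h.1 ≤ position
    · simp [pvScanF, hc] at hm; subst hm; exact ⟨List.mem_cons_self, hc⟩
    · simp [pvScanF, hc] at hm
      obtain ⟨h1, h2⟩ := ih hm
      exact ⟨List.mem_cons_of_mem _ h1, h2⟩

lemma pvScanF_isMax (position : Int) :
    ∀ {l : List (Int × String × Int)} {m}, l.Pairwise (fun a b => b.1 ≤ a.1) →
      pvScanF position l = some m → ∀ h ∈ l, h.1 ≤ position → h.1 ≤ m.1 := by
  intro l
  induction l with
  | nil => intro m _ h; simp [pvScanF] at h
  | cons x t ih =>
    intro m hp hm h hh hle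
    rcases List.pairwise_cons.mp hp with ⟨hx, ht⟩
    by_cases hc : x.1 ≤ position
    · simp [pvScanF, hc] at hm; subst hm
      rcases List.mem_cons.mp hh with heq | hh
      · rw [heq]
      · exact hx h hh
    · simp [pvScanF, hc] at hm
      rcases List.mem_cons.mp hh with heq | hh
      · exfalso; rw [heq] at hle; exact hc hle
      · exact ih ht hm h hh hle

lemma pvScanF_insertBy (position : Int) (x : Int × String × Int) :
    ∀ (acc : List (Int × String × Int)), acc.Pairwise (fun a b => b.1 ≤ a.1) →
      pvScanF position (PySem.List.insertBy (fun a b => decide (b.1 < a.1)) x acc)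
        = pvCStep position (pvScanF position acc) x := by
  intro acc
  induction acc with
  | nil =>
    intro _
    by_cases hc : x.1 ≤ position <;> simp [PySem.List.insertBy, pvScanF, pvCStep, hc]
  | cons y ys ih =>
    intro hp
    rcases List.pairwise_cons.mp hp with ⟨hy, hys⟩
    by_cases hb : y.1 < x.1
    · -- x goes in front
      have hlist : PySem.List.insertBy (fun a b => decide (b.1 < a.1)) x (y :: ys)
          = x :: y :: ys := by simp [PySem.List.insertBy, hb]
      rw [hlist]
      by_cases hc : x.1 ≤ position
      · -- x is a candidate and beats any candidate of y :: ys
        rcases hm : pvScanF position (y :: ys) with _ | m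
        · simp [pvScanF, pvCStep, hc]
        · have hmem := (pvScanF_some position hm).1
          have hmlt : m.1 < x.1 := by
            rcases List.mem_cons.mp hmem with heq | hmem
            · rw [heq]; exact hb
            · have := hy m hmem; omega
          simp [pvScanF, pvCStep, hc, hmlt]
      · simp [pvScanF, pvCStep, hc]
    · -- x goes after y
      have hlist : PySem.List.insertBy (fun a b => decide (b.1 < a.1)) x (y :: ys)
          = y :: PySem.List.insertBy (fun a b => decide (b.1 < a.1)) x ys := by
        simp [PySem.List.insertBy, hb]
      rw [hlist]
      by_cases hcy : y.1 ≤ position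
      · -- y stays the first candidate: x.1 ≤ y.1, so x never replaces y
        have hx : ¬ y.1 < x.1 := hb
        by_cases hc : x.1 ≤ position <;> simp [pvScanF, pvCStep, hcy, hc, hx]
      · simp [pvScanF, pvCStep, hcy, ih hys]

lemma pvSorted_fold (position : Int) (headings : List (Int × String × Int)) :
    pvScanF position (PySem.List.sorted headings (fun h => h.1) true)
      = headings.foldl (pvCStep position) none := by
  induction headings using List.reverseRecOn with
  | nil => rfl
  | append_singleton l x ih =>
    have h1 : PySem.List.sorted (l ++ [x]) (fun h => h.1) true
        = PySem.List.insertBy (fun a b => decide (b.1 < a.1)) x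
            (PySem.List.sorted l (fun h => h.1) true) := by
      rw [PySem.List.sorted_rev_eq_foldl_insertBy, PySem.List.sorted_rev_eq_foldl_insertBy,
          List.foldl_append, List.foldl_cons, List.foldl_nil]
    rw [h1, pvScanF_insertBy position x _ (PySem.List.sorted_pairwise_rev l (fun h => h.1)), ih,
        List.foldl_append, List.foldl_cons, List.foldl_nil]

def pvInv (s : String × Int) (acc : Option (Int × String × Int)) : Prop :=
  (acc = none ∧ s = ("", -1)) ∨
    ∃ m, acc = some m ∧ ((0 ≤ m.1 ∧ s = (m.2.1, m.1)) ∨ (m.1 < 0 ∧ s = ("", -1)))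

lemma pvInv_fold (position : Int) :
    ∀ (l : List (Int × String × Int)) (s : String × Int) (acc : Option (Int × String × Int)),
      pvInv s acc → pvInv (l.foldl (pvGStep position) s) (l.foldl (pvCStep position) acc) := by
  intro l
  induction l with
  | nil => intro s acc hinv; exact hinv
  | cons h tl ih =>
    intro s acc hinv
    simp only [List.foldl_cons]
    apply ih
    by_cases hle : h.1 ≤ position
    · rcases hinv with ⟨hacc, hs⟩ | ⟨m, hacc, ⟨hm, hs⟩ | ⟨hm, hs⟩⟩
      · subst hacc; subst hs
        by_cases h0 : (0:Int) ≤ h.1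
        · have : (-1:Int) < h.1 := by omega
          exact Or.inr ⟨h, by simp [pvCStep, hle], Or.inl ⟨h0, by simp [pvGStep, hle, this]⟩⟩
        · have : ¬ ((-1:Int) < h.1) := by omega
          exact Or.inr ⟨h, by simp [pvCStep, hle], Or.inr ⟨by omega, by simp [pvGStep, this]⟩⟩
      · subst hacc; subst hs
        by_cases hlt : m.1 < h.1
        · exact Or.inr ⟨h, by simp [pvCStep, hle, hlt], Or.inl ⟨by omega, by simp [pvGStep, hle, hlt]⟩⟩
        · exact Or.inr ⟨m, by simp [pvCStep, hle, hlt], Or.inl ⟨hm, by simp [pvGStep, hlt]⟩⟩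
      · subst hacc; subst hs
        by_cases hlt : m.1 < h.1
        · by_cases h0 : (0:Int) ≤ h.1
          · have : (-1:Int) < h.1 := by omega
            exact Or.inr ⟨h, by simp [pvCStep, hle, hlt], Or.inl ⟨h0, by simp [pvGStep, hle, this]⟩⟩
          · have : ¬ ((-1:Int) < h.1) := by omega
            exact Or.inr ⟨h, by simp [pvCStep, hle, hlt], Or.inr ⟨by omega, by simp [pvGStep, this]⟩⟩
        · have : ¬ ((-1:Int) < h.1) := by omega
          exact Or.inr ⟨m, by simp [pvCStep, hle, hlt], Or.inr ⟨hm, by simp [pvGStep, this]⟩⟩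
    · have hg : pvGStep position s h = s := by
        simp [pvGStep, hle]
      have hcs : pvCStep position acc h = acc := by
        simp [pvCStep, hle]
      rw [hg, hcs]; exact hinv

-- ===== VERDICT (by name: the statement is the Claim_ definition above) =====
theorem get_nearest_heading_py_spec : Claim_unchanged_get_nearest_heading_py := by
  intro headings position _ hnD
  unfold get_nearest_heading_py get_nearest_heading_py_alt
  rw [pvA_drop_level, pvScanB_eq_scanF, pvSorted_fold]
  have hinv := pvInv_fold position headings ("", -1) none (Or.inl ⟨rfl, rfl⟩)
  rcases hinv with ⟨hacc, hs⟩ | ⟨m, hacc, ⟨hm, hs⟩ | ⟨hm, hs⟩⟩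
  · rw [hacc, hs]
  · rw [hacc, hs]
  · exfalso
    have hscan : pvScanF position (PySem.List.sorted headings (fun h => h.1) true) = some m := by
      rw [pvSorted_fold]; exact hacc
    have hmem := pvScanF_some position hscan
    rw [PySem.List.mem_sorted _ _ _ _] at hmem
    apply hnD
    refine ⟨⟨m, hmem.1, hmem.2⟩, ?_⟩
    intro h hh hhle
    have hh' : h ∈ PySem.List.sorted headings (fun h => h.1) true :=
      (PySem.List.mem_sorted _ _ _ _).mpr hh
    have := pvScanF_isMax position
      (PySem.List.sorted_pairwise_rev headings (fun h => h.1)) hscan h hh' hhle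
    omega

theorem get_nearest_heading_py_changed : Claim_changed_get_nearest_heading_py := by
  unfold Claim_changed_get_nearest_heading_py; decide
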